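-- pv_equiv track=rewrite | github.com/FanchenBao/leetcode | LeetCode_2592.py | maximizeGreatness
-- ===== SOURCE A (Python) =====
-- from typing import List
--
-- def maximizeGreatness(nums: List[int]) -> int:
--     """Sort the nums and two pointer. Each time the hi points to a value
--     larger than lo, that is greatness.
--
--     O(NlogN), 563 ms, faster than 74.03%
--     """
--     nums.sort()
--     lo = res = 0
--     for hi in range(len(nums)):
--         if nums[hi] > nums[lo]:
--             res += 1
--             lo += 1
--     return res
-- ===== SOURCE B (Python) =====
-- from typing import List
--
-- def maximizeGreatness(nums: List[int]) -> int:
--     """No sorting: each value can keep at most one copy of itself un-beaten,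
--     so the answer is n minus the highest frequency, found in one counting pass."""
--     freq = {}
--     for x in nums:
--         freq[x] = freq.get(x, 0) + 1
--     return len(nums) - max(freq.values(), default=0)
-- ===== Notes on version B (the rewrite author's own statement) =====
-- stated objective: alternative
-- what changed: Replaces sort + two-pointer sweep with a single frequency-counting pass: the answer equals n minus the maximum frequency, so B builds a hash counter and returns len(nums) - max frequency (no sort, no index pointers).
import Mathlib
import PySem

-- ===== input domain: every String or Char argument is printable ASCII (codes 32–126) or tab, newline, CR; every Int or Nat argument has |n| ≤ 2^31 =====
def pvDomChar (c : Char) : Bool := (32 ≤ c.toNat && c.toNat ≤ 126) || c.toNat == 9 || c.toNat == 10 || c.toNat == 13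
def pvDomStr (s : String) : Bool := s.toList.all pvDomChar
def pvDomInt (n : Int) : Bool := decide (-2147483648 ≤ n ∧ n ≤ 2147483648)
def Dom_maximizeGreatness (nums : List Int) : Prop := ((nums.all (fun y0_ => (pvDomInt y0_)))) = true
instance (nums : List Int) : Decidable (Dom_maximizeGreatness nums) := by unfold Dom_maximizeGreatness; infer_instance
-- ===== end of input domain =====

-- B replaces A's sort + two-pointer sweep by one counting pass (answer = n - max frequency);
-- equivalence is about the return value only: Python A sorts its argument in place, B does not mutate it.


-- ===== PORT A =====
-- nums.sort(); lo = res = 0; for hi in range(len(nums)): if nums[hi] > nums[lo]: res += 1; lo += 1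
def maximizeGreatness (nums : List Int) : Int :=
  let s := PySem.List.sorted nums (fun x => x)
  ((PySem.List.pyRange 0 (s.length : Int)).foldl
    (fun (st : Int × Int) hi =>
      match PySem.List.pyGet? s hi, PySem.List.pyGet? s st.1 with
      | some a, some b => if a > b then (st.1 + 1, st.2 + 1) else st
      | _, _ => st)
    (0, 0)).2

-- ===== PORT B =====
-- freq = {}; for x in nums: freq[x] = freq.get(x, 0) + 1; return len(nums) - max(freq.values(), default=0)
def maximizeGreatness_alt (nums : List Int) : Int :=
  let freq := nums.foldl (fun d x => d.insert x (d.getD x 0 + 1)) PySem.Dict.empty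
  (nums.length : Int) - PySem.List.maxD freq.values (fun v => v) 0

-- ===== PRECONDITION & SPEC =====
def Spec_maximizeGreatness (nums : List Int) (out : Int) : Prop := out = maximizeGreatness_alt nums
instance (nums : List Int) (out : Int) : Decidable (Spec_maximizeGreatness nums out) := by unfold Spec_maximizeGreatness; infer_instance

-- ===== CLAIM (what is proved, stated in full; the proofs are below) =====
def Claim_equal_maximizeGreatness : Prop := ∀ (nums : List Int), Dom_maximizeGreatness nums → Spec_maximizeGreatness nums (maximizeGreatness nums)

-- ===== LEMMAS AND PROOFS =====

-- max multiplicity of any value in l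
def pvM (l : List Int) : Nat := l.foldl (fun acc x => max acc (l.count x)) 0

theorem pvFoldlMaxLe {β : Type} (xs : List β) (f : β → Nat) (init m : Nat)
    (h0 : init ≤ m) (h : ∀ x ∈ xs, f x ≤ m) :
    List.foldl (fun a x => max a (f x)) init xs ≤ m := by
  induction xs generalizing init with
  | nil => simpa using h0
  | cons y t ih =>
      simp only [List.foldl_cons]
      exact ih _ (max_le h0 (h y (by simp))) (fun x hx => h x (by simp [hx]))

theorem pvM_le (l : List Int) (m : Nat) (h : ∀ x ∈ l, l.count x ≤ m) : pvM l ≤ m :=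
  pvFoldlMaxLe l (fun x => l.count x) 0 m (Nat.zero_le _) h

theorem pvCount_le_M (l : List Int) (x : Int) (hx : x ∈ l) : l.count x ≤ pvM l :=
  (PySem.List.le_foldl_max_nat l (fun x => l.count x) 0).2 x hx

theorem pvM_congr (l₁ l₂ : List Int) (h : ∀ x, l₁.count x = l₂.count x) : pvM l₁ = pvM l₂ := by
  have mem : ∀ x, x ∈ l₁ ↔ x ∈ l₂ := by
    intro x
    rw [← List.count_pos_iff, ← List.count_pos_iff, h]
  apply le_antisymm
  · exact pvM_le _ _ (fun x hx => by
      rw [h]; exact pvCount_le_M _ _ ((mem x).mp hx))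
  · exact pvM_le _ _ (fun x hx => by
      rw [← h]; exact pvCount_le_M _ _ ((mem x).mpr hx))

theorem pvM_le_length (l : List Int) : pvM l ≤ l.length :=
  pvM_le _ _ (fun _ _ => List.count_le_length)

theorem pvM_append_singleton (P : List Int) (v : Int) :
    pvM (P ++ [v]) = max (pvM P) (P.count v + 1) := by
  have hcnt : ∀ x : Int, (P ++ [v]).count x = P.count x + if x = v then 1 else 0 := by
    intro x
    rcases eq_or_ne x v with h | h
    · subst h; simp [List.count_append]
    · simp [List.count_append, h, Ne.symm h]
  apply le_antisymm
  · apply pvM_le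
    intro x hx
    rw [hcnt x]
    by_cases hxv : x = v
    · subst hxv; simp
    · rcases List.mem_append.mp hx with hxP | hxv'
      · simp only [hxv, if_false, add_zero]
        exact le_trans (pvCount_le_M P x hxP) (le_max_left _ _)
      · simp at hxv'; exact absurd hxv' hxv
  · apply max_le
    · apply pvM_le
      intro x hx
      calc P.count x ≤ (P ++ [v]).count x := by rw [hcnt x]; omega
        _ ≤ pvM (P ++ [v]) := pvCount_le_M _ _ (List.mem_append.mpr (Or.inl hx))
    · calc P.count v + 1 = (P ++ [v]).count v := by rw [hcnt v]; simp
        _ ≤ pvM (P ++ [v]) := pvCount_le_M _ _ (by simp)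

-- in a sorted list, s[r] = s[k] iff at least k - r copies of s[k] occur before index k
theorem pvEqIffCount (s : List Int)
    (hs : ∀ p q : Nat, ∀ hpq : p ≤ q, ∀ hq : q < s.length, s[p]'(lt_of_le_of_lt hpq hq) ≤ s[q])
    (k r : Nat) (hk : k < s.length) (hr : r ≤ k) :
    s[r]'(lt_of_le_of_lt hr hk) = s[k] ↔ k - r ≤ (s.take k).count s[k] := by
  constructor
  · intro heq
    have hsub : ((s.take k).drop r).Sublist (s.take k) := List.drop_sublist _ _
    have hlen : ((s.take k).drop r).length = k - r := by
      simp [List.length_take, Nat.min_eq_left (le_of_lt hk)]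
    have hall : ∀ b ∈ (s.take k).drop r, s[k] = b := by
      intro b hb
      rcases List.mem_iff_getElem.mp hb with ⟨i, hi, hib⟩
      have hi' : r + i < k := by omega
      have h1 : s[r]'(lt_of_le_of_lt hr hk) ≤ s[r + i]'(lt_trans hi' hk) :=
        hs r (r + i) (by omega) (lt_trans hi' hk)
      have h2 : s[r + i]'(lt_trans hi' hk) ≤ s[k] := hs (r + i) k (by omega) hk
      have : ((s.take k).drop r)[i] = s[r + i]'(lt_trans hi' hk) := by
        rw [List.getElem_drop, List.getElem_take]
      rw [← hib, this]
      omega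
    have := List.count_eq_length.mpr hall
    calc k - r = ((s.take k).drop r).length := hlen.symm
      _ = ((s.take k).drop r).count s[k] := this.symm
      _ ≤ (s.take k).count s[k] := hsub.count_le _
  · intro hc
    by_contra hne
    have hrk : r < k := by
      rcases lt_or_eq_of_le hr with h | h
      · exact h
      · subst h; exact absurd rfl hne
    have hlt : s[r]'(lt_of_le_of_lt hr hk) < s[k] :=
      lt_of_le_of_ne (hs r k hr hk) hne
    have hsplit : s.take k = s.take (r + 1) ++ (s.take k).drop (r + 1) := by
      conv_lhs => rw [← List.take_append_drop (r + 1) (s.take k)]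
      rw [List.take_take, Nat.min_eq_left (by omega)]
    have hc1 : (s.take (r + 1)).count s[k] = 0 := by
      rw [List.count_eq_zero]
      intro hmem
      rcases List.mem_iff_getElem.mp hmem with ⟨i, hi, hib⟩
      have hi' : i ≤ r := by
        simp only [List.length_take] at hi; omega
      have hile : i < s.length := lt_of_le_of_lt (le_trans hi' hr) hk
      have : (s.take (r + 1))[i] = s[i]'hile := List.getElem_take
      have hle : s[i]'hile ≤ s[r]'(lt_of_le_of_lt hr hk) := hs i r hi' _
      omega
    have hc2 : ((s.take k).drop (r + 1)).count s[k] ≤ k - (r + 1) := by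
      calc ((s.take k).drop (r + 1)).count s[k] ≤ ((s.take k).drop (r + 1)).length :=
            List.count_le_length
        _ = k - (r + 1) := by simp [List.length_take, Nat.min_eq_left (le_of_lt hk)]
    rw [hsplit, List.count_append, hc1] at hc
    omega

-- the loop invariant of A's two-pointer sweep over the sorted list
theorem pvInv (s : List Int)
    (hs : ∀ p q : Nat, ∀ hpq : p ≤ q, ∀ hq : q < s.length, s[p]'(lt_of_le_of_lt hpq hq) ≤ s[q])
    (k : Nat) (hk : k ≤ s.length) :
    (PySem.List.pyRange 0 (k : Int)).foldl
      (fun (st : Int × Int) hi =>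
        match PySem.List.pyGet? s hi, PySem.List.pyGet? s st.1 with
        | some a, some b => if a > b then (st.1 + 1, st.2 + 1) else st
        | _, _ => st)
      (0, 0)
    = (((k - pvM (s.take k) : Nat) : Int), ((k - pvM (s.take k) : Nat) : Int)) := by
  induction k with
  | zero => simp [PySem.List.pyRange]
  | succ k ih =>
      have hk' : k < s.length := by omega
      have hMk : pvM (s.take k) ≤ k := by
        calc pvM (s.take k) ≤ (s.take k).length := pvM_le_length _
          _ = k := by simp [Nat.min_eq_left (le_of_lt hk')]
      set M := pvM (s.take k) with hM
      set r := k - M with hrdef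
      have hr : r ≤ k := by omega
      have hrlt : r < s.length := lt_of_le_of_lt hr hk'
      have hcast : ((k + 1 : Nat) : Int) = (k : Int) + 1 := by push_cast; ring
      rw [hcast, PySem.List.pyRange_one_succ_right (by positivity), List.foldl_append,
          ih (le_of_lt hk')]
      have hget_k : PySem.List.pyGet? s (k : Int) = some (s[k]'hk') := by
        rw [PySem.List.pyGet?_natCast, List.getElem?_eq_getElem hk']
      have hget_r : PySem.List.pyGet? s ((r : Nat) : Int) = some (s[r]'hrlt) := by
        rw [PySem.List.pyGet?_natCast, List.getElem?_eq_getElem hrlt]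
      have htake : s.take (k + 1) = s.take k ++ [s[k]'hk'] := by
        rw [List.take_add_one, List.getElem?_eq_getElem hk']
        rfl
      set c := (s.take k).count (s[k]'hk') with hc
      have hMnew : pvM (s.take (k + 1)) = max M (c + 1) := by
        rw [htake, pvM_append_singleton]
      have hiff := pvEqIffCount s hs k r hk' hr
      simp only [List.foldl_cons, List.foldl_nil, hget_k, hget_r]
      by_cases hlt : s[r]'hrlt < s[k]'hk'
      · -- greatness: res and lo advance
        have hne : s[r]'hrlt ≠ s[k]'hk' := ne_of_lt hlt
        have hclt : c < k - r := by
          by_contra hge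
          exact hne (hiff.mpr (by omega))
        have hcM : c + 1 ≤ M := by omega
        have : pvM (s.take (k + 1)) = M := by rw [hMnew]; omega
        rw [this]
        simp only [gt_iff_lt, if_pos hlt]
        have : k + 1 - M = r + 1 := by omega
        rw [this]
        push_cast
        rfl
      · -- equal values: pointers stay
        have heq : s[r]'hrlt = s[k]'hk' :=
          le_antisymm (hs r k hr hk') (not_lt.mp hlt)
        have hcge : k - r ≤ c := hiff.mp heq
        have hceq : c = M := by
          rcases Nat.eq_zero_or_pos c with h0 | hpos
          · omega
          · have hmem : s[k]'hk' ∈ s.take k := List.count_pos_iff.mp (by omega)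
            have := pvCount_le_M (s.take k) _ hmem
            omega
        have : pvM (s.take (k + 1)) = M + 1 := by rw [hMnew]; omega
        rw [this]
        simp only [gt_iff_lt, if_neg hlt]
        have : k + 1 - (M + 1) = r := by omega
        rw [this]

-- A computes n - (max multiplicity of the sorted list)
theorem pvA_eq (nums : List Int) :
    maximizeGreatness nums
      = (((PySem.List.sorted nums (fun x => x)).length
          - pvM (PySem.List.sorted nums (fun x => x)) : Nat) : Int) := by
  unfold maximizeGreatness
  set s := PySem.List.sorted nums (fun x => x) with hsdef
  have hs : ∀ p q : Nat, ∀ hpq : p ≤ q, ∀ hq : q < s.length,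
      s[p]'(lt_of_le_of_lt hpq hq) ≤ s[q] := by
    intro p q hpq hq
    exact PySem.List.sorted_id_getElem_mono nums hpq hq
  have := pvInv s hs s.length le_rfl
  simp only [this, List.take_length]

-- B computes n - (max multiplicity of nums)
theorem pvB_eq (nums : List Int) :
    maximizeGreatness_alt nums = (nums.length : Int) - (pvM nums : Int) := by
  simp only [maximizeGreatness_alt, PySem.Dict.foldl_insert_getD_add_one_eq_counter]
  have hvals : (PySem.Dict.counter nums).values
      = (PySem.Set.ofList nums).map (fun k => ((nums.count k : Nat) : Int)) := by
    show ((PySem.Dict.counter nums).items.map Prod.snd) = _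
    rw [PySem.Dict.items_counter]
    simp [List.map_map, Function.comp]
  rw [hvals]
  rcases nums with _ | ⟨x, t⟩
  · simp [PySem.List.maxD, PySem.List.max?, pvM, PySem.Set.ofList]
  · set nums := x :: t
    have hxmem : x ∈ PySem.Set.ofList nums :=
      (PySem.Set.mem_ofList nums x).mpr (by simp [nums])
    set L := (PySem.Set.ofList nums).map (fun k => ((nums.count k : Nat) : Int)) with hL
    have hLne : L ≠ [] := by
      intro h
      rw [hL] at h
      simp only [List.map_eq_nil_iff] at h
      rw [h] at hxmem
      exact absurd hxmem (List.not_mem_nil)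
    obtain ⟨y, t', hLy⟩ := List.exists_cons_of_ne_nil hLne
    have hmaxD : PySem.List.maxD L (fun v => v) 0 = List.foldl max y t' := by
      rw [PySem.List.maxD, hLy, PySem.List.max?_id_cons, Option.getD_some]
    set F := List.foldl max y t' with hF
    have hboundsL : ∀ z ∈ L, z ≤ F := by
      intro z hz
      rw [hLy] at hz
      rcases List.mem_cons.mp hz with h | h
      · rw [h]; exact (PySem.List.le_foldl_max t' y).1
      · exact (PySem.List.le_foldl_max t' y).2 z h
    have hFmem : F ∈ L := by
      rw [hLy]
      rcases PySem.List.foldl_max_mem t' y with h | h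
      · rw [hF, h]; exact List.mem_cons_self
      · exact List.mem_cons_of_mem _ h
    rw [hL] at hFmem
    rcases List.mem_map.mp hFmem with ⟨k0, hk0mem, hk0⟩
    have hk0nums : k0 ∈ nums := (PySem.Set.mem_ofList nums k0).mp hk0mem
    have hFeq : F = ((pvM nums : Nat) : Int) := by
      have hle : pvM nums ≤ nums.count k0 := by
        apply pvM_le
        intro z hz
        have hzmem : z ∈ PySem.Set.ofList nums := (PySem.Set.mem_ofList nums z).mpr hz
        have : ((nums.count z : Nat) : Int) ≤ F :=
          hboundsL _ (List.mem_map.mpr ⟨z, hzmem, rfl⟩)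
        rw [← hk0] at this
        exact_mod_cast this
      have hge : nums.count k0 ≤ pvM nums := pvCount_le_M nums k0 hk0nums
      rw [← hk0]
      congr 1
      omega
    rw [hmaxD, hFeq]

-- ===== VERDICT (by name: the statement is the Claim_ definition above) =====
theorem maximizeGreatness_spec : Claim_equal_maximizeGreatness := by
  intro nums _
  unfold Spec_maximizeGreatness
  rw [pvA_eq, pvB_eq]
  have hperm : (PySem.List.sorted nums (fun x => x)).Perm nums :=
    PySem.List.sorted_perm nums (fun x => x) false
  have hlen : (PySem.List.sorted nums (fun x => x)).length = nums.length := hperm.length_eq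
  have hM : pvM (PySem.List.sorted nums (fun x => x)) = pvM nums :=
    pvM_congr _ _ (fun x => hperm.count_eq x)
  have hMle : pvM nums ≤ nums.length := pvM_le_length nums
  rw [hlen, hM]
  omega
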